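-- pv_equiv track=rewrite | github.com/vaibhav-jain-dev/learning-algo | problems/200-must-solve/arrays/10-monotonic-array/similar/03-can-become-monotonic/python_code.py | can_become_non_increasing
-- ===== SOURCE A (Python) =====
-- from typing import List
--
-- def can_become_non_increasing(array: List[int]) -> bool:
--     """Check if array can become non-increasing with one change."""
--     if len(array) <= 2:
--         return True
--
--     violations = 0
--     violation_idx = -1
--
--     for i in range(len(array) - 1):
--         if array[i] < array[i + 1]:
--             violations += 1
--             violation_idx = i
--             if violations > 1:
--                 return False
--
--     if violations == 0:
--         return True
--
--     # One violation at index i: arr[i] < arr[i+1]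
--     # Option A: Change arr[i] to something >= arr[i+1]
--     #           Works if i == 0 OR arr[i-1] >= arr[i+1]
--     # Option B: Change arr[i+1] to something <= arr[i]
--     #           Works if i+1 == n-1 OR arr[i] >= arr[i+2]
--
--     i = violation_idx
--
--     option_a = (i == 0) or (array[i - 1] >= array[i + 1])
--     option_b = (i + 1 == len(array) - 1) or (array[i] >= array[i + 2])
--
--     return option_a or option_b
-- ===== SOURCE B (Python) =====
-- from typing import List
--
-- def can_become_non_increasing(array: List[int]) -> bool:
--     """Check if array can become non-increasing with one change."""
--     it = iter(array)
--     p = next(it, None)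
--     if p is None:
--         return True
--     pp = None          # element before p (None at the start)
--     changed = False    # one repair already spent
--     for x in it:
--         if p >= x:
--             pp, p = p, x
--         elif changed:
--             return False
--         elif pp is None or pp >= x:
--             # lower p to x; next previous value is x
--             pp, p, changed = p, x, True
--         else:
--             # raise x to p; next previous value is p
--             pp, p, changed = x, p, True
--     return True
-- ===== Notes on version B (the rewrite author's own statement) =====
-- stated objective: simpler
-- what changed: Replaced A's count-violations-then-analyze-options structure (violation counter, stored index, post-loop option_a/option_b block) by a single greedy pass that repairs the first violation inline (lower or raise, decided from the previous element) and simply fails on a second one.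
import Mathlib
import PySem

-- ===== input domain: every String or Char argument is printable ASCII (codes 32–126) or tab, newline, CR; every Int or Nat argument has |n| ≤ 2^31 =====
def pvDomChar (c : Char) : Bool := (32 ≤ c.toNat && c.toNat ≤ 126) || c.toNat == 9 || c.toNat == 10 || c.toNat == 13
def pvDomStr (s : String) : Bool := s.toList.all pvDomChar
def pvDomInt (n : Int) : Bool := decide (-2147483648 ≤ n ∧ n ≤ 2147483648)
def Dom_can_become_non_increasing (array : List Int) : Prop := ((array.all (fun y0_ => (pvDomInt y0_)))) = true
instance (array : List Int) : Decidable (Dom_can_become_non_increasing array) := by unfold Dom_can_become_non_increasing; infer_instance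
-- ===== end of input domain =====

-- B replaces A's count-then-analyze structure by a single greedy pass with inline repair; same values everywhere.

-- ===== PORT A =====
-- loop body of A's 'for i in range(len(array)-1)'; state: .error = early 'return False',
-- .ok (violations, violation_idx).  All indices i, i+1 are in range here, so pyGetD _ _ 0 is exact.
def stepA (array : List Int) (st : Except Bool (Int × Int)) (i : Int) : Except Bool (Int × Int) :=
  match st with
  | .error b => .error b
  | .ok (violations, violation_idx) =>
    if PySem.List.pyGetD array i 0 < PySem.List.pyGetD array (i + 1) 0 then
      if violations + 1 > 1 then .error false
      else .ok (violations + 1, i)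
    else .ok (violations, violation_idx)

-- A's code after the loop (the early 'return False' arrives as .error).
-- Python's short-circuit 'or' is rendered as nested ifs, so array[i-1]/array[i+2] are
-- only read when Python reads them (then in range, so pyGetD _ _ 0 is exact).
def finishA (array : List Int) (r : Except Bool (Int × Int)) : Bool :=
  match r with
  | .error b => b
  | .ok (violations, violation_idx) =>
    if violations = 0 then true
    else
      let i := violation_idx
      let option_a : Bool :=
        if i = 0 then true
        else decide (PySem.List.pyGetD array (i - 1) 0 ≥ PySem.List.pyGetD array (i + 1) 0)
      let option_b : Bool :=
        if i + 1 = (array.length : Int) - 1 then true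
        else decide (PySem.List.pyGetD array i 0 ≥ PySem.List.pyGetD array (i + 2) 0)
      option_a || option_b

def can_become_non_increasing (array : List Int) : Bool :=
  if array.length ≤ 2 then true
  else
    finishA array
      ((PySem.List.pyRange 0 ((array.length : Int) - 1) 1).foldl (stepA array) (.ok (0, -1)))

-- ===== PORT B =====
-- greedy pass: pp = element before p (none at the start), p = current previous value,
-- rest = elements still to scan, changed = one repair already spent.
def goB (pp : Option Int) (p : Int) (rest : List Int) (changed : Bool) : Bool :=
  match rest with
  | [] => true
  | x :: t =>
    if p ≥ x then goB (some p) x t changed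
    else if changed then false
    else if pp.elim true (fun q => q ≥ x) then goB (some p) x t true   -- lower p to x
    else goB (some x) p t true                                         -- raise x to p

def can_become_non_increasing_alt (array : List Int) : Bool :=
  match array with
  | [] => true
  | x :: t => goB none x t false

-- ===== PRECONDITION & SPEC =====
def Spec_can_become_non_increasing (array : List Int) (out : Bool) : Prop := out = can_become_non_increasing_alt array
instance (array : List Int) (out : Bool) : Decidable (Spec_can_become_non_increasing array out) := by unfold Spec_can_become_non_increasing; infer_instance

-- ===== CLAIM (what is proved, stated in full; the proofs are below) =====
def Claim_equal_can_become_non_increasing : Prop := ∀ (array : List Int), Dom_can_become_non_increasing array → Spec_can_become_non_increasing array (can_become_non_increasing array)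

-- ===== LEMMAS AND PROOFS =====

-- "no violation from prev p onward": the pair check both programs perform after the repair
def pairsOK (p : Int) : List Int → Bool
  | [] => true
  | x :: t => decide (p ≥ x) && pairsOK x t

theorem goB_true_eq_pairsOK (rest : List Int) : ∀ pp p, goB pp p rest true = pairsOK p rest := by
  induction rest with
  | nil => intro pp p; rfl
  | cons x t ih =>
    intro pp p
    simp only [goB, pairsOK, ih]
    by_cases h : p ≥ x <;> simp [h]

theorem foldl_stepA_error (array : List Int) (l : List Int) (b : Bool) :
    l.foldl (stepA array) (.error b) = .error b := by
  induction l with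
  | nil => rfl
  | cons i t ih => simpa [stepA] using ih

-- monotonicity of the pair check in its previous element
theorem pairsOK_mono (l : List Int) : ∀ p q : Int, p ≤ q → pairsOK p l = true → pairsOK q l = true := by
  cases l with
  | nil => intro p q _ _; rfl
  | cons x t =>
    intro p q hpq h
    simp only [pairsOK, Bool.and_eq_true, decide_eq_true_eq] at h ⊢
    exact ⟨by omega, h.2⟩

-- phase 2 of A's loop: after the first violation was recorded as .ok (1, i),
-- the rest of the scan only looks for a second violation
theorem foldl_stepA_one (a : List Int) (i : Int) (d : Nat) : ∀ k, k + d = a.length - 1 →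
    (PySem.List.pyRange (k : Int) ((a.length : Int) - 1) 1).foldl (stepA a) (.ok (1, i)) =
      if pairsOK (a.getD k 0) (a.drop (k + 1)) then .ok (1, i) else .error false := by
  induction d with
  | zero =>
    intro k hk
    rw [PySem.List.pyRange_one_eq_nil (by omega)]
    rw [List.drop_eq_nil_of_le (by omega)]
    simp [pairsOK]
  | succ d ih =>
    intro k hk
    have hkn : k + 1 < a.length := by omega
    have hk0 : k < a.length := by omega
    rw [PySem.List.pyRange_one_cons (by omega)]
    rw [List.foldl_cons]
    have hcast : ((k : Int) + 1) = ((k + 1 : Nat) : Int) := by push_cast; ring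
    have e1 : stepA a (Except.ok (1, i)) (k : Int) =
        if a[k] < a[k + 1] then Except.error false else Except.ok (1, i) := by
      simp only [stepA, hcast, PySem.List.pyGetD_natCast,
        List.getD_eq_getElem a 0 hk0, List.getD_eq_getElem a 0 hkn]
      norm_num
    rw [e1, List.drop_eq_getElem_cons hkn]
    simp only [pairsOK, List.getD_eq_getElem a 0 hk0]
    by_cases h : a[k] < a[k + 1]
    · rw [if_pos h, foldl_stepA_error]
      have hnge : ¬ (a[k] ≥ a[k + 1]) := by omega
      simp [hnge]
    · rw [if_neg h, hcast, ih (k + 1) (by omega), List.getD_eq_getElem a 0 hkn]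
      have hge : a[k] ≥ a[k + 1] := by omega
      simp [hge]

theorem mainLemma (a : List Int) (d : Nat) : ∀ k, k + d + 1 = a.length →
    finishA a ((PySem.List.pyRange (k : Int) ((a.length : Int) - 1) 1).foldl (stepA a) (.ok (0, -1)))
      = goB (if k = 0 then none else some (a.getD (k - 1) 0)) (a.getD k 0) (a.drop (k + 1)) false := by
  induction d with
  | zero =>
    intro k hk
    rw [PySem.List.pyRange_one_eq_nil (by omega)]
    rw [List.drop_eq_nil_of_le (by omega)]
    simp [finishA, goB]
  | succ d ih =>
    intro k hk
    have hkn : k + 1 < a.length := by omega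
    have hk0 : k < a.length := by omega
    rw [PySem.List.pyRange_one_cons (by omega)]
    rw [List.foldl_cons]
    have hcast : ((k : Int) + 1) = ((k + 1 : Nat) : Int) := by push_cast; ring
    have e1 : stepA a (Except.ok (0, -1)) (k : Int) =
        if a[k] < a[k + 1] then Except.ok (1, (k : Int)) else Except.ok (0, -1) := by
      simp only [stepA, hcast, PySem.List.pyGetD_natCast,
        List.getD_eq_getElem a 0 hk0, List.getD_eq_getElem a 0 hkn]
      norm_num
    rw [e1, List.drop_eq_getElem_cons hkn]
    simp only [goB, List.getD_eq_getElem a 0 hk0]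
    by_cases h : a[k] < a[k + 1]
    · -- first violation at index k
      have hnge : ¬ (a[k] ≥ a[k + 1]) := by omega
      rw [if_pos h, hcast, foldl_stepA_one a (k : Int) d (k + 1) (by omega)]
      simp only [hnge, Bool.false_eq_true, if_false,
        goB_true_eq_pairsOK, List.getD_eq_getElem a 0 hkn]
      cases hcB : pairsOK a[k + 1] (a.drop (k + 1 + 1)) with
      | false =>
        rw [if_neg (by simp)]
        have hcB' : pairsOK a[k] (a.drop (k + 1 + 1)) = false := by
          cases hx : pairsOK a[k] (a.drop (k + 1 + 1)) with
          | false => rfl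
          | true => rw [pairsOK_mono _ _ _ (le_of_lt h) hx] at hcB; exact hcB
        simp only [finishA]
        split_ifs <;> simp [hcB']
      | true =>
        rw [if_pos (by simp)]
        simp only [finishA, if_neg (one_ne_zero)]
        by_cases hk0' : k = 0
        · subst hk0'
          simp
        · have hki : ¬((k : Int) = 0) := by omega
          have hcast1 : ((k : Int) - 1) = ((k - 1 : Nat) : Int) := by omega
          have hkm : k - 1 < a.length := by omega
          rw [if_neg hk0', if_neg hki]
          simp only [hcast1, hcast, PySem.List.pyGetD_natCast, Option.elim,
            List.getD_eq_getElem a 0 hkm, List.getD_eq_getElem a 0 hkn,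
            List.getD_eq_getElem a 0 hk0]
          by_cases ha : a[k - 1] ≥ a[k + 1]
          · simp [ha]
          · simp only [ge_iff_le, (by simpa using ha : decide (a[k + 1] ≤ a[k - 1]) = false),
              Bool.false_eq_true, if_false, Bool.false_or]
            by_cases hlast : k + 1 + 1 = a.length
            · rw [if_pos (by push_cast; omega)]
              rw [List.drop_eq_nil_of_le (by omega)]
              simp [pairsOK]
            · have hk2 : k + 1 + 1 < a.length := by omega
              rw [if_neg (by push_cast; omega)]
              have hcast2 : ((k : Int) + 2) = ((k + 1 + 1 : Nat) : Int) := by push_cast; ring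
              rw [hcast2]
              simp only [PySem.List.pyGetD_natCast, List.getD_eq_getElem a 0 hk2]
              rw [List.drop_eq_getElem_cons hk2] at hcB ⊢
              simp only [pairsOK, Bool.and_eq_true, decide_eq_true_eq] at hcB
              simp [pairsOK, hcB.2, ge_iff_le]
          -- end k > 0
    · -- no violation at index k
      have hge : a[k] ≥ a[k + 1] := by omega
      rw [if_neg h, if_pos (by simpa using hge), hcast, ih (k + 1) (by omega),
        if_neg (Nat.succ_ne_zero k), Nat.add_sub_cancel,
        List.getD_eq_getElem a 0 hkn, List.getD_eq_getElem a 0 hk0]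

-- ===== VERDICT (by name: the statement is the Claim_ definition above) =====
theorem can_become_non_increasing_spec : Claim_equal_can_become_non_increasing := by
  intro a _
  unfold Spec_can_become_non_increasing can_become_non_increasing
  by_cases h2 : a.length ≤ 2
  · rw [if_pos h2]
    match a, h2 with
    | [], _ => rfl
    | [x], _ => rfl
    | [x, y], _ =>
      simp only [can_become_non_increasing_alt, goB, Option.elim]
      split_ifs <;> simp_all
  · rw [if_neg h2]
    have hne : a.length ≥ 3 := by omega
    have hm := mainLemma a (a.length - 1) 0 (by omega)
    rw [Nat.cast_zero] at hm
    rw [hm]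
    match a, hne with
    | x :: t, _ =>
      simp [can_become_non_increasing_alt]
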